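-- pv_equiv track=rewrite | github.com/JaekyungCho2140/sebastianmk2 | legacy/LY/src/batch_merger.py | sort_batches_with_base
-- ===== SOURCE A (Python) =====
-- from typing import Dict, List, Tuple, Optional
--
-- def sort_batches_with_base(batch_names: List[str], base_batch: str) -> List[str]:
--     """
--     배치명 정렬 (기준 배치 우선)
--
--     Args:
--         batch_names: 배치명 리스트
--         base_batch: 기준 배치명
--
--     Returns:
--         정렬된 배치명 리스트 (base_batch가 첫 번째)
--
--     Reference:
--         PRD v1.4.0 섹션 2.5
--     """
--     # 기준 배치 제외
--     other_batches = [b for b in batch_names if b != base_batch]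
--
--     # REGULAR/EXTRA 분류
--     regular = []
--     extras = []
--
--     for batch in other_batches:
--         if batch == 'REGULAR':
--             regular.append(batch)
--         elif batch.startswith('EXTRA'):
--             num = int(batch[5:])
--             extras.append((num, batch))
--
--     # EXTRA 번호순 정렬
--     extras.sort(key=lambda x: x[0])
--
--     # 기준 배치 + REGULAR (있으면) + EXTRA 순
--     sorted_others = regular + [b for _, b in extras]
--
--     return [base_batch] + sorted_others
-- ===== SOURCE B (Python) =====
-- def sort_batches_with_base(batch_names, base_batch):
--     # Selection approach: tag each kept name with a sort key quadruple
--     # (group, number, original index, name), then repeatedly extract the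
--     # minimum remaining quadruple.  The original index makes keys unique,
--     # so ties never reach the name component.
--     pending = []
--     for i, b in enumerate(batch_names):
--         if b == base_batch:
--             continue
--         if b == 'REGULAR':
--             pending.append((0, 0, i, b))
--         elif b.startswith('EXTRA'):
--             pending.append((1, int(b[5:]), i, b))
--     out = [base_batch]
--     while pending:
--         m = min(pending)
--         pending.remove(m)
--         out.append(m[3])
--     return out
-- ===== Notes on version B (the rewrite author's own statement) =====
-- stated objective: alternative
-- what changed: A partitions non-base names into a regular list and a (num,name) extras list, library-sorts the extras and concatenates; B instead tags each kept name once with a unique key quadruple (group, number, original index, name) and then builds the output by repeated minimum-extraction (selection sort) from that pending pool, trading the O(n log n) library sort for an O(n^2) scan loop of the same observable order.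
import Mathlib
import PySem

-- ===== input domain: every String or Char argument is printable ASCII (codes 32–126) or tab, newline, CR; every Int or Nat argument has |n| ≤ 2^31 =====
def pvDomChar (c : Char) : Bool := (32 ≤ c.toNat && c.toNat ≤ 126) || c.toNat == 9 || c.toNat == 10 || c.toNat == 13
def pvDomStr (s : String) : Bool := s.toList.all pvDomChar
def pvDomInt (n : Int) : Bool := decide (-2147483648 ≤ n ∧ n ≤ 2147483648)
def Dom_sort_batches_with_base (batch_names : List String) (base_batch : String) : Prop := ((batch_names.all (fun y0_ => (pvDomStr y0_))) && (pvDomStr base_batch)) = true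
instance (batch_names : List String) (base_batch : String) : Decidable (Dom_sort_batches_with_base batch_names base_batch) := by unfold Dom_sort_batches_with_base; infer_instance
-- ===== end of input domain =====

-- B replaces A's partition-then-library-sort with a selection loop: each kept name is
-- tagged once with a unique key quadruple (group, number, original index, name) and the
-- output is built by repeated minimum-extraction from that pool (alternative algorithm,
-- same observable order); equal wherever int(b[5:]) parses.

-- int(b[5:]) — port of the shared subexpression of both programs; `.getD 0` stands at the
-- point where Python raises ValueError (exactly the inputs Pre_ excludes).
def pvInt5 (b : String) : Int := (PySem.Int.ofChars? (b.toList.drop 5)).getD 0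

-- ===== PORT A =====
def sort_batches_with_base (batch_names : List String) (base_batch : String) : List String :=
  let other_batches := batch_names.filter (fun b => b != base_batch)
  let st := other_batches.foldl
    (fun (acc : List String × List (Int × String)) batch =>
      if batch == "REGULAR" then (acc.1 ++ [batch], acc.2)
      else if PySem.Str.startswith batch "EXTRA" then
        (acc.1, acc.2 ++ [(pvInt5 batch, batch)])
      else acc)
    ([], [])
  let extras := PySem.List.sorted st.2 (fun x => x.1) false
  let sorted_others := st.1 ++ extras.map (fun x => x.2)
  [base_batch] ++ sorted_others

-- ===== PORT B =====
-- Python tuple '<' on B's pending quadruples (group, number, index, name). The name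
-- component is never compared by Python's min: the index components are pairwise
-- distinct (one per list position), so comparison is always decided by the first
-- three fields; the port is exact on every pending pool B ever builds.
def pvQuadLt (a b : Int × Int × Int × String) : Bool :=
  decide (a.1 < b.1) || (a.1 == b.1 && (decide (a.2.1 < b.2.1) ||
    (a.2.1 == b.2.1 && decide (a.2.2.1 < b.2.2.1))))

-- min(pending): running minimum, kept only on strict '<' (first extremal wins)
def pvMinQ (x : Int × Int × Int × String) (xs : List (Int × Int × Int × String)) :
    Int × Int × Int × String :=
  xs.foldl (fun m q => if pvQuadLt q m then q else m) x

-- pending.remove(m): drop the first element equal to m (in B's loop m is always present)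
def pvRemoveQ : List (Int × Int × Int × String) → (Int × Int × Int × String) →
    List (Int × Int × Int × String)
  | [], _ => []
  | y :: ys, q => if y == q then ys else y :: pvRemoveQ ys q

-- the while loop: fuel = initial length of pending (each round removes one element)
def pvSelLoop : Nat → List (Int × Int × Int × String) → List String
  | 0, _ => []
  | _ + 1, [] => []
  | n + 1, x :: xs =>
      let m := pvMinQ x xs
      m.2.2.2 :: pvSelLoop n (pvRemoveQ (x :: xs) m)

def sort_batches_with_base_alt (batch_names : List String) (base_batch : String) : List String :=
  let pending := (PySem.List.enumerate batch_names).foldl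
    (fun acc (p : Int × String) =>
      if p.2 == base_batch then acc
      else if p.2 == "REGULAR" then acc ++ [((0 : Int), (0 : Int), p.1, p.2)]
      else if PySem.Str.startswith p.2 "EXTRA" then acc ++ [((1 : Int), pvInt5 p.2, p.1, p.2)]
      else acc)
    []
  base_batch :: pvSelLoop pending.length pending

-- ===== PRECONDITION & SPEC =====
-- Pre_ excludes exactly the inputs where Python A raises ValueError: a batch (other than
-- base_batch) that starts with "EXTRA" but whose suffix int(b[5:]) does not parse.
def Pre_sort_batches_with_base (batch_names : List String) (base_batch : String) : Prop :=
  ∀ b ∈ batch_names, b ≠ base_batch → b ≠ "REGULAR" → PySem.Str.startswith b "EXTRA" = true →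
    (PySem.Int.ofChars? (b.toList.drop 5)).isSome

instance (batch_names : List String) (base_batch : String) : Decidable (Pre_sort_batches_with_base batch_names base_batch) := by
  unfold Pre_sort_batches_with_base; infer_instance

def pvWitness_sort_batches_with_base : List String × String :=
  (["EXTRA2", "BASE", "REGULAR", "EXTRA1", "stuff"], "BASE")

def Spec_sort_batches_with_base (batch_names : List String) (base_batch : String) (out : List String) : Prop := out = sort_batches_with_base_alt batch_names base_batch
instance (batch_names : List String) (base_batch : String) (out : List String) : Decidable (Spec_sort_batches_with_base batch_names base_batch out) := by unfold Spec_sort_batches_with_base; infer_instance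

-- ===== CLAIM (what is proved, stated in full; the proofs are below) =====
def Claim_equal_sort_batches_with_base : Prop := ∀ (batch_names : List String) (base_batch : String), Dom_sort_batches_with_base batch_names base_batch → Pre_sort_batches_with_base batch_names base_batch → Spec_sort_batches_with_base batch_names base_batch (sort_batches_with_base batch_names base_batch)

-- ===== LEMMAS AND PROOFS =====

-- A's comparison function on (num, name) pairs
def pvBA (a b : Int × String) : Bool := decide (a.1 < b.1)

-- named forms of the folds appearing in port A (definitionally equal to the port's lambdas)
def pvStepA (acc : List String × List (Int × String)) (batch : String) : List String × List (Int × String) :=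
  if batch == "REGULAR" then (acc.1 ++ [batch], acc.2)
  else if PySem.Str.startswith batch "EXTRA" then (acc.1, acc.2 ++ [(pvInt5 batch, batch)])
  else acc

def pvExtract (b : String) : Option (Int × String) :=
  if b == "REGULAR" then none
  else if PySem.Str.startswith b "EXTRA" then some (pvInt5 b, b) else none

-- the quadruple B's building loop emits for one enumerated pair, as an Option
def pvQuad (base_batch : String) (p : Int × String) : Option (Int × Int × Int × String) :=
  if p.2 == base_batch then none
  else if p.2 == "REGULAR" then some ((0 : Int), (0 : Int), p.1, p.2)
  else if PySem.Str.startswith p.2 "EXTRA" then some ((1 : Int), pvInt5 p.2, p.1, p.2)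
  else none

-- the two ports, re-expressed with the named helpers
lemma pv_portA (batch_names : List String) (base_batch : String) :
    sort_batches_with_base batch_names base_batch =
      base_batch ::
        (((batch_names.filter (fun b => b != base_batch)).foldl pvStepA ([], [])).1 ++
          (PySem.List.sorted ((batch_names.filter (fun b => b != base_batch)).foldl pvStepA ([], [])).2
            (fun x => x.1) false).map (fun x => x.2)) := rfl

lemma pv_sortedA (E : List (Int × String)) :
    PySem.List.sorted E (fun x => x.1) false = E.foldl (fun acc q => PySem.List.insertBy pvBA q acc) [] := rfl

-- B's building loop is the filterMap of pvQuad over the enumeration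
lemma pv_flatMap_toList {A B : Type} (f : A -> Option B) (zs : List A) :
    zs.flatMap (fun p => (f p).toList) = zs.filterMap f := by
  induction zs with
  | nil => simp
  | cons p zs ih => cases hq : f p <;> simp [hq, ih]

lemma pv_pending (base_batch : String) (zs : List (Int × String)) :
    ∀ acc, zs.foldl
      (fun acc (p : Int × String) =>
        if p.2 == base_batch then acc
        else if p.2 == "REGULAR" then acc ++ [((0 : Int), (0 : Int), p.1, p.2)]
        else if PySem.Str.startswith p.2 "EXTRA" then acc ++ [((1 : Int), pvInt5 p.2, p.1, p.2)]
        else acc) acc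
      = acc ++ zs.filterMap (pvQuad base_batch) := by
  intro acc
  have hcongr : zs.foldl
      (fun acc (p : Int × String) =>
        if p.2 == base_batch then acc
        else if p.2 == "REGULAR" then acc ++ [((0 : Int), (0 : Int), p.1, p.2)]
        else if PySem.Str.startswith p.2 "EXTRA" then acc ++ [((1 : Int), pvInt5 p.2, p.1, p.2)]
        else acc) acc
      = zs.foldl (fun acc p => acc ++ (pvQuad base_batch p).toList) acc := by
    refine PySem.List.foldl_congr_mem _ _ _ _ ?_
    intro a p _
    unfold pvQuad
    split_ifs <;> simp
  rw [hcongr, PySem.List.foldl_append_eq_flatMap, pv_flatMap_toList]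

lemma pv_portB (batch_names : List String) (base_batch : String) :
    sort_batches_with_base_alt batch_names base_batch =
      base_batch ::
        pvSelLoop ((PySem.List.enumerate batch_names).filterMap (pvQuad base_batch)).length
          ((PySem.List.enumerate batch_names).filterMap (pvQuad base_batch)) := by
  unfold sort_batches_with_base_alt
  rw [pv_pending]
  simp

-- ---- facts about pvQuadLt (lexicographic on the first three Int fields) ----

lemma pv_lt_irrefl (a : Int × Int × Int × String) : pvQuadLt a a = false := by
  simp [pvQuadLt]

lemma pv_lt_asymm {a b : Int × Int × Int × String} (h : pvQuadLt a b = true) :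
    pvQuadLt b a = false := by
  simp only [pvQuadLt, Bool.or_eq_true, Bool.and_eq_true, decide_eq_true_eq, beq_iff_eq] at h
  simp only [pvQuadLt, Bool.or_eq_false_iff, Bool.and_eq_false_iff, decide_eq_false_iff_not,
    beq_eq_false_iff_ne, ne_eq]
  omega

lemma pv_le_trans {a b c : Int × Int × Int × String}
    (h1 : pvQuadLt b a = false) (h2 : pvQuadLt c b = false) : pvQuadLt c a = false := by
  simp only [pvQuadLt, Bool.or_eq_false_iff, Bool.and_eq_false_iff, decide_eq_false_iff_not,
    beq_eq_false_iff_ne, ne_eq] at h1 h2 ⊢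
  omega

lemma pv_lt_total {a b : Int × Int × Int × String} (h : a.2.2.1 ≠ b.2.2.1) :
    pvQuadLt a b = true ∨ pvQuadLt b a = true := by
  simp only [pvQuadLt, Bool.or_eq_true, Bool.and_eq_true, decide_eq_true_eq, beq_iff_eq]
  omega

-- ---- insertion sort by pvQuadLt (ghost normal form shared by both sides) ----

def pvInsSort (L : List (Int × Int × Int × String)) : List (Int × Int × Int × String) :=
  L.foldl (fun acc q => PySem.List.insertBy pvQuadLt q acc) []

lemma pv_insertBy_perm (f : (Int × Int × Int × String) → (Int × Int × Int × String) → Bool)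
    (x : Int × Int × Int × String) (ys : List (Int × Int × Int × String)) :
    (PySem.List.insertBy f x ys).Perm (x :: ys) := by
  induction ys with
  | nil => simp [PySem.List.insertBy]
  | cons y ys ih =>
    simp only [PySem.List.insertBy]
    split
    · exact List.Perm.refl _
    · exact ((ih.cons y).trans (List.Perm.swap x y ys))

lemma pv_foldl_insert_perm (L : List (Int × Int × Int × String)) :
    ∀ acc, (L.foldl (fun acc q => PySem.List.insertBy pvQuadLt q acc) acc).Perm (acc ++ L) := by
  induction L with
  | nil => intro acc; simp
  | cons x L ih =>
    intro acc
    refine (ih _).trans ?_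
    refine (List.Perm.append_right L (pv_insertBy_perm pvQuadLt x acc)).trans ?_
    simpa using (List.perm_middle (a := x) (l₁ := acc) (l₂ := L)).symm

lemma pv_insert_pairwise (x : Int × Int × Int × String)
    (ys : List (Int × Int × Int × String))
    (h : ys.Pairwise (fun a b => pvQuadLt b a = false)) :
    (PySem.List.insertBy pvQuadLt x ys).Pairwise (fun a b => pvQuadLt b a = false) := by
  induction ys with
  | nil => simp [PySem.List.insertBy]
  | cons y ys ih =>
    rw [List.pairwise_cons] at h
    obtain ⟨hy, hys⟩ := h
    simp only [PySem.List.insertBy]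
    split
    · rename_i hlt
      refine List.pairwise_cons.2 ⟨?_, List.pairwise_cons.2 ⟨hy, hys⟩⟩
      intro z hz
      rcases List.mem_cons.1 hz with rfl | hz
      · exact pv_lt_asymm hlt
      · exact pv_le_trans (pv_lt_asymm hlt) (hy z hz)
    · rename_i hlt
      refine List.pairwise_cons.2 ⟨?_, ih hys⟩
      intro z hz
      rcases (PySem.List.mem_insertBy pvQuadLt x z ys).1 hz with rfl | hz
      · exact Bool.not_eq_true _ ▸ (by simpa using hlt)
      · exact hy z hz

lemma pv_insSort_pairwise_le (L : List (Int × Int × Int × String)) :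
    (pvInsSort L).Pairwise (fun a b => pvQuadLt b a = false) := by
  unfold pvInsSort
  suffices h : ∀ acc, acc.Pairwise (fun a b => pvQuadLt b a = false) →
      (L.foldl (fun acc q => PySem.List.insertBy pvQuadLt q acc) acc).Pairwise
        (fun a b => pvQuadLt b a = false) by
    exact h [] (by simp)
  induction L with
  | nil => intro acc hacc; simpa using hacc
  | cons x L ih => intro acc hacc; exact ih _ (pv_insert_pairwise x acc hacc)

lemma pv_insSort_perm (L : List (Int × Int × Int × String)) : (pvInsSort L).Perm L := by
  simpa using pv_foldl_insert_perm L []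

-- ---- facts about B's selection loop ----

lemma pv_minQ_mem (x : Int × Int × Int × String) (xs : List (Int × Int × Int × String)) :
    pvMinQ x xs ∈ x :: xs := by
  unfold pvMinQ
  induction xs generalizing x with
  | nil => simp
  | cons y ys ih =>
    simp only [List.foldl_cons]
    rcases List.mem_cons.1 (ih (if pvQuadLt y x then y else x)) with h | h
    · rw [h]; split <;> simp
    · simp [h]

lemma pv_minQ_min (x : Int × Int × Int × String) (xs : List (Int × Int × Int × String)) :
    ∀ q ∈ x :: xs, pvQuadLt q (pvMinQ x xs) = false := by
  unfold pvMinQ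
  induction xs generalizing x with
  | nil =>
    intro q hq
    simp only [List.mem_singleton] at hq
    simpa [hq] using pv_lt_irrefl x
  | cons y ys ih =>
    intro q hq
    simp only [List.foldl_cons]
    set x' := if pvQuadLt y x then y else x with hx'
    have hmin := ih x'
    have hqx' : pvQuadLt x x' = false := by
      by_cases h : pvQuadLt y x <;> simp [hx', h, pv_lt_irrefl, pv_lt_asymm]
    have hqy' : pvQuadLt y x' = false := by
      by_cases h : pvQuadLt y x <;> simp_all [pv_lt_irrefl]
    have hx'min : pvQuadLt x' (ys.foldl (fun m q => if pvQuadLt q m then q else m) x') = false :=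
      hmin x' (by simp)
    rcases List.mem_cons.1 hq with rfl | hq
    · exact pv_le_trans hx'min hqx'
    · rcases List.mem_cons.1 hq with rfl | hq
      · exact pv_le_trans hx'min hqy'
      · exact hmin q (by simp [hq])

lemma pv_remove_perm (m : Int × Int × Int × String) (L : List (Int × Int × Int × String))
    (h : m ∈ L) : L.Perm (m :: pvRemoveQ L m) := by
  induction L with
  | nil => simp at h
  | cons y ys ih =>
    simp only [pvRemoveQ]
    by_cases hy : y == m
    · have : y = m := by simpa using hy
      subst this; simp
    · have hm : m ∈ ys := by
        rcases List.mem_cons.1 h with rfl | h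
        · simp at hy
        · exact h
      simp only [hy]
      exact ((ih hm).cons y).trans (List.Perm.swap m y (pvRemoveQ ys m))

-- ghost quad-level version of the selection loop
def pvSelQuads : Nat → List (Int × Int × Int × String) → List (Int × Int × Int × String)
  | 0, _ => []
  | _ + 1, [] => []
  | n + 1, x :: xs =>
      let m := pvMinQ x xs
      m :: pvSelQuads n (pvRemoveQ (x :: xs) m)

lemma pv_selLoop_map (n : Nat) (L : List (Int × Int × Int × String)) :
    pvSelLoop n L = (pvSelQuads n L).map (fun q => q.2.2.2) := by
  induction n generalizing L with
  | zero => simp [pvSelLoop, pvSelQuads]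
  | succ n ih => cases L <;> simp [pvSelLoop, pvSelQuads, ih]

lemma pv_sel_spec (n : Nat) :
    ∀ L : List (Int × Int × Int × String), L.length = n →
      L.Pairwise (fun a b => a.2.2.1 ≠ b.2.2.1) →
      (pvSelQuads n L).Perm L ∧
        (pvSelQuads n L).Pairwise (fun a b => pvQuadLt a b = true) := by
  induction n with
  | zero =>
    intro L hL _
    rw [List.length_eq_zero_iff] at hL
    subst hL
    exact ⟨by simp [pvSelQuads], by simp [pvSelQuads]⟩
  | succ n ih =>
    intro L hL hne
    cases L with
    | nil => simp at hL
    | cons x xs =>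
      simp only [pvSelQuads]
      set m := pvMinQ x xs with hm
      have hmem : m ∈ x :: xs := pv_minQ_mem x xs
      have hperm : (x :: xs).Perm (m :: pvRemoveQ (x :: xs) m) := pv_remove_perm m _ hmem
      have hlen : (pvRemoveQ (x :: xs) m).length = n := by
        have := hperm.length_eq
        simp only [List.length_cons] at this hL
        omega
      have hne' : (m :: pvRemoveQ (x :: xs) m).Pairwise (fun a b => a.2.2.1 ≠ b.2.2.1) :=
        (hperm.pairwise_iff (fun {x y} h => Ne.symm h)).1 hne
      rw [List.pairwise_cons] at hne'
      obtain ⟨hmne, hrne⟩ := hne'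
      obtain ⟨ihperm, ihpw⟩ := ih (pvRemoveQ (x :: xs) m) hlen hrne
      constructor
      · exact (ihperm.cons m).trans hperm.symm
      · refine List.pairwise_cons.2 ⟨?_, ihpw⟩
        intro q hq
        have hqmem : q ∈ pvRemoveQ (x :: xs) m := ihperm.mem_iff.1 hq
        have hqL : q ∈ x :: xs := hperm.symm.mem_iff.1 (by simp [hqmem])
        have hqm : pvQuadLt q m = false := pv_minQ_min x xs q hqL
        rcases pv_lt_total (hmne q hqmem) with h | h
        · exact h
        · rw [h] at hqm; cases hqm

-- ---- connecting the pending pool to A's intermediate lists ----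

lemma pv_quad_shape {base_batch : String} {p : Int × String} {q : Int × Int × Int × String}
    (h : pvQuad base_batch p = some q) :
    q.2.2.1 = p.1 ∧ ((q.1 = 0 ∧ q.2.1 = 0) ∨ q.1 = 1) := by
  unfold pvQuad at h
  split_ifs at h <;> simp_all <;> simp [← h]

lemma pv_enum_lb {α : Type} (xs : List α) : ∀ i, ∀ p ∈ PySem.List.enumerate xs i, i ≤ p.1 := by
  induction xs with
  | nil => intro i p hp; simp [PySem.List.enumerate] at hp
  | cons x xs ih =>
    intro i p hp
    simp only [PySem.List.enumerate, List.mem_cons] at hp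
    rcases hp with rfl | hp
    · simp
    · have := ih (i + 1) p hp
      omega

lemma pv_enum_pairwise {α : Type} (xs : List α) :
    ∀ i, (PySem.List.enumerate xs i).Pairwise (fun a b => a.1 < b.1) := by
  induction xs with
  | nil => intro i; simp [PySem.List.enumerate]
  | cons x xs ih =>
    intro i
    simp only [PySem.List.enumerate]
    refine List.pairwise_cons.2 ⟨?_, ih (i + 1)⟩
    intro p hp
    have := pv_enum_lb xs (i + 1) p hp
    omega

lemma pv_pending_idx_pairwise (batch_names : List String) (base_batch : String) (i : Int) :
    ((PySem.List.enumerate batch_names i).filterMap (pvQuad base_batch)).Pairwise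
      (fun a b => a.2.2.1 < b.2.2.1) := by
  refine List.pairwise_filterMap.2 ?_
  refine (pv_enum_pairwise batch_names i).imp_of_mem ?_
  intro p p' hp hp' hlt q hq q' hq'
  rw [(pv_quad_shape hq).1, (pv_quad_shape hq').1]
  exact hlt

-- the REGULAR quadruples carry exactly A's regular names, in order
lemma pv_reg_names (batch_names : List String) (base_batch : String) : ∀ i,
    ((((PySem.List.enumerate batch_names i).filterMap (pvQuad base_batch)).filter
        (fun q => q.1 == 0)).map (fun q => q.2.2.2))
      = (batch_names.filter (fun b => b != base_batch)).filter (fun b => b == "REGULAR") := by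
  induction batch_names with
  | nil => intro i; simp [PySem.List.enumerate]
  | cons x xs ih =>
    intro i
    have henum : PySem.List.enumerate (x :: xs) i = (i, x) :: PySem.List.enumerate xs (i + 1) := rfl
    rw [henum]
    by_cases h1 : x = base_batch
    · have hq : pvQuad base_batch (i, x) = none := by simp [pvQuad, h1]
      simp only [List.filterMap_cons, hq]
      rw [ih (i + 1)]
      simp [h1]
    · by_cases h2 : x = "REGULAR"
      · subst h2
        have hq : pvQuad base_batch (i, "REGULAR") = some ((0 : Int), (0 : Int), i, "REGULAR") := by
          simp [pvQuad, h1]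
        simp only [List.filterMap_cons, hq, List.filter_cons]
        simp only [show ((((0 : Int), (0 : Int), i, "REGULAR") : Int × Int × Int × String).1 == 0) = true from by simp, if_true, List.map_cons]
        rw [ih (i + 1)]
        simp [h1]
      · by_cases h3 : PySem.Str.startswith x "EXTRA" = true
        · have hq : pvQuad base_batch (i, x) = some ((1 : Int), pvInt5 x, i, x) := by
            simp only [pvQuad]
            rw [if_neg (by simpa using h1), if_neg (by simpa using h2), if_pos h3]
          simp only [List.filterMap_cons, hq, List.filter_cons]
          simp only [show ((((1 : Int), pvInt5 x, i, x) : Int × Int × Int × String).1 == 0) = false from by simp, Bool.false_eq_true, if_false]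
          rw [ih (i + 1)]
          simp [h1, h2]
        · have hq : pvQuad base_batch (i, x) = none := by
            simp only [pvQuad]
            rw [if_neg (by simpa using h1), if_neg (by simpa using h2), if_neg h3]
          simp only [List.filterMap_cons, hq]
          rw [ih (i + 1)]
          simp [h1, h2]

-- the EXTRA quadruples carry exactly A's (num, name) pairs, in order
lemma pv_extra_pairs (batch_names : List String) (base_batch : String) : ∀ i,
    ((((PySem.List.enumerate batch_names i).filterMap (pvQuad base_batch)).filter
        (fun q => q.1 == 1)).map (fun q => (q.2.1, q.2.2.2)))
      = (batch_names.filter (fun b => b != base_batch)).filterMap pvExtract := by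
  induction batch_names with
  | nil => intro i; simp [PySem.List.enumerate]
  | cons x xs ih =>
    intro i
    have henum : PySem.List.enumerate (x :: xs) i = (i, x) :: PySem.List.enumerate xs (i + 1) := rfl
    rw [henum]
    by_cases h1 : x = base_batch
    · have hq : pvQuad base_batch (i, x) = none := by simp [pvQuad, h1]
      simp only [List.filterMap_cons, hq]
      rw [ih (i + 1)]
      simp [h1]
    · by_cases h2 : x = "REGULAR"
      · subst h2
        have hq : pvQuad base_batch (i, "REGULAR") = some ((0 : Int), (0 : Int), i, "REGULAR") := by
          simp [pvQuad, h1]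
        simp only [List.filterMap_cons, hq, List.filter_cons]
        simp only [show ((((0 : Int), (0 : Int), i, "REGULAR") : Int × Int × Int × String).1 == 1) = false from by simp, Bool.false_eq_true, if_false]
        rw [ih (i + 1)]
        simp [pvExtract, h1]
      · by_cases h3 : PySem.Str.startswith x "EXTRA" = true
        · have hq : pvQuad base_batch (i, x) = some ((1 : Int), pvInt5 x, i, x) := by
            simp only [pvQuad]
            rw [if_neg (by simpa using h1), if_neg (by simpa using h2), if_pos h3]
          simp only [List.filterMap_cons, hq, List.filter_cons]
          simp only [show ((((1 : Int), pvInt5 x, i, x) : Int × Int × Int × String).1 == 1) = true from by simp, if_true, List.map_cons]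
          rw [ih (i + 1)]
          have hx : pvExtract x = some (pvInt5 x, x) := by
            simp only [pvExtract]
            rw [if_neg (by simpa using h2), if_pos h3]
          simp [h1, hx]
        · have hq : pvQuad base_batch (i, x) = none := by
            simp only [pvQuad]
            rw [if_neg (by simpa using h1), if_neg (by simpa using h2), if_neg h3]
          simp only [List.filterMap_cons, hq]
          rw [ih (i + 1)]
          have hx : pvExtract x = none := by
            simp only [pvExtract]
            rw [if_neg (by simpa using h2), if_neg h3]
          simp [h1, hx]

-- A's fold over other_batches, characterised
lemma pv_foldA (xs : List String) : ∀ (r : List String) (e : List (Int × String)),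
    xs.foldl pvStepA (r, e)
      = (r ++ xs.filter (fun b => b == "REGULAR"), e ++ xs.filterMap pvExtract) := by
  induction xs with
  | nil => intro r e; simp
  | cons x xs ih =>
    intro r e
    rw [List.foldl_cons]
    by_cases hx : x = "REGULAR"
    · subst hx
      have : pvStepA (r, e) "REGULAR" = (r ++ ["REGULAR"], e) := by simp [pvStepA]
      rw [this, ih]
      simp [pvExtract]
    · by_cases hs : PySem.Str.startswith x "EXTRA" = true
      · have hs' := hs; simp at hs'
        have : pvStepA (r, e) x = (r, e ++ [(pvInt5 x, x)]) := by simp [pvStepA, hx, hs']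
        rw [this, ih]
        simp [pvExtract, hx, hs']
      · have hs' := hs; simp at hs'
        have : pvStepA (r, e) x = (r, e) := by simp [pvStepA, hx, hs']
        rw [this, ih]
        simp [pvExtract, hx, hs']

-- ---- bridging A's pair insertion sort with the quadruple insertion sort ----

lemma pv_insert_bridge (q : Int × Int × Int × String) (acc : List (Int × Int × Int × String))
    (hq : q.1 = 1) (hacc : ∀ e ∈ acc, e.1 = 1 ∧ e.2.2.1 < q.2.2.1) :
    PySem.List.insertBy pvBA (q.2.1, q.2.2.2) (acc.map (fun e => (e.2.1, e.2.2.2)))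
      = (PySem.List.insertBy pvQuadLt q acc).map (fun e => (e.2.1, e.2.2.2)) := by
  induction acc with
  | nil => rfl
  | cons e acc ih =>
    obtain ⟨he1, heidx⟩ := hacc e (by simp)
    have hcmp : pvBA (q.2.1, q.2.2.2) (e.2.1, e.2.2.2) = pvQuadLt q e := by
      simp only [pvBA, pvQuadLt, hq, he1]
      simp only [beq_self_eq_true, Bool.true_and]
      have h1 : decide ((1 : Int) < 1) = false := by decide
      have h2 : decide (q.2.2.1 < e.2.2.1) = false := by simpa using Int.not_lt.2 (le_of_lt heidx)
      cases hnum : decide (q.2.1 < e.2.1) <;>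
        cases hnumeq : (q.2.1 == e.2.1) <;> simp [h1, h2]
    simp only [List.map_cons, PySem.List.insertBy, hcmp]
    cases h : pvQuadLt q e with
    | true => simp
    | false => simp [ih (fun r hr => hacc r (by simp [hr]))]

lemma pv_fold_bridge (Eq : List (Int × Int × Int × String)) :
    ∀ acc : List (Int × Int × Int × String),
      (∀ e ∈ Eq, e.1 = 1) → Eq.Pairwise (fun a b => a.2.2.1 < b.2.2.1) →
      (∀ e ∈ acc, e.1 = 1) → (∀ e ∈ acc, ∀ f ∈ Eq, e.2.2.1 < f.2.2.1) →
      (Eq.map (fun e => (e.2.1, e.2.2.2))).foldl (fun a p => PySem.List.insertBy pvBA p a)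
          (acc.map (fun e => (e.2.1, e.2.2.2)))
        = (Eq.foldl (fun a q => PySem.List.insertBy pvQuadLt q a) acc).map
            (fun e => (e.2.1, e.2.2.2)) := by
  induction Eq with
  | nil => intro acc _ _ _ _; simp
  | cons x Eq ih =>
    intro acc hg hpw haccg haccidx
    simp only [List.map_cons, List.foldl_cons]
    rw [pv_insert_bridge x acc (hg x (by simp))
      (fun e he => ⟨haccg e he, haccidx e he x (by simp)⟩)]
    rw [List.pairwise_cons] at hpw
    refine ih _ (fun e he => hg e (by simp [he])) hpw.2 ?_ ?_
    · intro e he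
      rcases (PySem.List.mem_insertBy pvQuadLt x e acc).1 he with rfl | he
      · exact hg e (by simp)
      · exact haccg e he
    · intro e he f hf
      rcases (PySem.List.mem_insertBy pvQuadLt x e acc).1 he with rfl | he
      · exact hpw.1 f hf
      · exact haccidx e he f (by simp [hf])

lemma pv_fold_bridge0 (Eq : List (Int × Int × Int × String))
    (hg : ∀ e ∈ Eq, e.1 = 1) (hpw : Eq.Pairwise (fun a b => a.2.2.1 < b.2.2.1)) :
    (Eq.map (fun e => (e.2.1, e.2.2.2))).foldl (fun acc q => PySem.List.insertBy pvBA q acc) []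
      = (pvInsSort Eq).map (fun e => (e.2.1, e.2.2.2)) := by
  simpa using pv_fold_bridge Eq [] hg hpw (by simp) (by simp)

lemma pv_lt_reg {a b : Int × Int × Int × String} (ha1 : a.1 = 0) (ha2 : a.2.1 = 0)
    (hb1 : b.1 = 0) (hb2 : b.2.1 = 0) (h : a.2.2.1 < b.2.2.1) : pvQuadLt a b = true := by
  simp [pvQuadLt, ha1, ha2, hb1, hb2, h]

lemma pv_lt_zero_one {a b : Int × Int × Int × String} (ha : a.1 = 0) (hb : b.1 = 1) :
    pvQuadLt a b = true := by
  simp [pvQuadLt, ha, hb]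

-- ===== VERDICT (by name: the statement is the Claim_ definition above) =====
theorem sort_batches_with_base_spec : Claim_equal_sort_batches_with_base := by
  intro batch_names base_batch _ _
  unfold Spec_sort_batches_with_base
  rw [pv_portA, pv_portB, pv_foldA]
  simp only [List.nil_append]
  rw [pv_sortedA, ← pv_reg_names batch_names base_batch 0, ← pv_extra_pairs batch_names base_batch 0]
  set P := (PySem.List.enumerate batch_names 0).filterMap (pvQuad base_batch) with hP
  have hPidx : P.Pairwise (fun a b => a.2.2.1 < b.2.2.1) :=
    pv_pending_idx_pairwise batch_names base_batch 0
  have hPshape : ∀ q ∈ P, (q.1 = 0 ∧ q.2.1 = 0) ∨ q.1 = 1 := by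
    intro q hq
    rw [hP, List.mem_filterMap] at hq
    obtain ⟨p, _, hp⟩ := hq
    exact (pv_quad_shape hp).2
  set Rq := P.filter (fun q => q.1 == 0) with hRq
  set Eq := P.filter (fun q => q.1 == 1) with hEq
  have hEg : ∀ e ∈ Eq, e.1 = 1 := by
    intro e he; rw [hEq, List.mem_filter] at he; simpa using he.2
  have hRg : ∀ e ∈ Rq, e.1 = 0 ∧ e.2.1 = 0 := by
    intro e he
    rw [hRq, List.mem_filter] at he
    have h0 : e.1 = 0 := by simpa using he.2
    rcases hPshape e he.1 with h | h
    · exact h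
    · omega
  have hEidx : Eq.Pairwise (fun a b => a.2.2.1 < b.2.2.1) := hPidx.filter _
  rw [pv_fold_bridge0 Eq hEg hEidx, pv_selLoop_map]
  suffices hSel : pvSelQuads P.length P = Rq ++ pvInsSort Eq by
    rw [hSel]
    simp
  -- both sides are permutations of P, pairwise strictly increasing under pvQuadLt
  have hne : P.Pairwise (fun a b => a.2.2.1 ≠ b.2.2.1) :=
    hPidx.imp (fun h => ne_of_lt h)
  obtain ⟨hselperm, hselpw⟩ := pv_sel_spec P.length P rfl hne
  have hinsperm : (pvInsSort Eq).Perm Eq := pv_insSort_perm Eq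
  have hSperm : (Rq ++ pvInsSort Eq).Perm P := by
    refine (List.Perm.append_left Rq hinsperm).trans ?_
    have hfe : P.filter (fun q => !(q.1 == 0)) = Eq := by
      rw [hEq]
      refine List.filter_congr ?_
      intro q hq
      rcases hPshape q hq with ⟨h0, _⟩ | h1
      · simp [h0]
      · simp [h1]
    rw [hRq, ← hfe]
    exact List.filter_append_perm _ P
  have hSpw : (Rq ++ pvInsSort Eq).Pairwise (fun a b => pvQuadLt a b = true) := by
    rw [List.pairwise_append]
    refine ⟨?_, ?_, ?_⟩
    · have hRidx : Rq.Pairwise (fun a b => a.2.2.1 < b.2.2.1) := hPidx.filter _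
      refine hRidx.imp_of_mem ?_
      intro a b ha hb h
      exact pv_lt_reg (hRg a ha).1 (hRg a ha).2 (hRg b hb).1 (hRg b hb).2 h
    · have hle := pv_insSort_pairwise_le Eq
      have hneE : Eq.Pairwise (fun a b => a.2.2.1 ≠ b.2.2.1) := hEidx.imp (fun h => ne_of_lt h)
      have hne2 : (pvInsSort Eq).Pairwise (fun a b => a.2.2.1 ≠ b.2.2.1) :=
        (hinsperm.pairwise_iff (fun {x y} h => Ne.symm h)).2 hneE
      refine (hle.and hne2).imp ?_
      rintro a b ⟨hba, hab⟩
      rcases pv_lt_total hab with h | h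
      · exact h
      · rw [h] at hba; cases hba
    · intro a ha b hb
      have hb' : b ∈ Eq := hinsperm.mem_iff.1 hb
      exact pv_lt_zero_one (hRg a ha).1 (hEg b hb')
  exact List.Perm.eq_of_pairwise
    (fun a b _ _ hab hba => absurd hba (by simp [pv_lt_asymm hab]))
    hselpw hSpw (hselperm.trans hSperm.symm)
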